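-- pv_equiv track=rewrite | github.com/austinProGit/scheduler | src/schedule_inspector.py | senior_with_1000_level_courses
-- ===== SOURCE A (Python) =====
-- def schedule_length(schedule):
--     return len(schedule)
--
-- def semester_type_sequence(schedule):
--     SEMESTER_TYPE_SUCCESSOR = {'Fa': 'Sp', 'Sp': 'Su', 'Su': 'Fa'}
--     sequence = None
--     previous_season = 'Su'
--     if schedule_length(schedule) > 0:
--         sequence = []
--         for semester in schedule:
--             sequence.append(SEMESTER_TYPE_SUCCESSOR[previous_season])
--             previous_season = SEMESTER_TYPE_SUCCESSOR[previous_season]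
--     return sequence
--
-- def last_semester_type(schedule):
--     semester_types = semester_type_sequence(schedule)
--     if semester_types != None:
--         return semester_types[-1]
--     else: return None
--
-- def senior_interval(schedule):
--     last_type = last_semester_type(schedule)
--     if last_type == 'Su':
--         return -3
--     if last_type == 'Sp':
--         return -2
--     if last_type == 'Fa':
--         return -1
--
-- def senior_year_semesters_list(schedule):
--     if schedule == None or schedule == [] or schedule == [[]]:
--         return None
--     senior_semesters = []
--     index = senior_interval(schedule)
--     for i in range(index, 0):
--         for semester in schedule[i]:
--             senior_semesters.append(semester)
--     return senior_semesters
--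
-- def senior_with_1000_level_courses(schedule):
--     found = False
--     senior_year = senior_year_semesters_list(schedule)
--     if senior_year != None:
--         for course in senior_year:
--             if ' 1' in course:
--                 found = True
--                 break
--     return found
-- ===== SOURCE B (Python) =====
-- def senior_with_1000_level_courses(schedule):
--     k = (len(schedule) - 1) % 3 + 1
--     return any(' 1' in course for semester in schedule[-k:] for course in semester)
-- ===== Notes on version B (the rewrite author's own statement) =====
-- stated objective: simpler
-- what changed: B computes the number of senior semesters directly as (len(schedule)-1)%3+1 instead of building the whole season sequence semester by semester, and checks the last k semesters with one any() over a slice.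
import Mathlib
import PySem

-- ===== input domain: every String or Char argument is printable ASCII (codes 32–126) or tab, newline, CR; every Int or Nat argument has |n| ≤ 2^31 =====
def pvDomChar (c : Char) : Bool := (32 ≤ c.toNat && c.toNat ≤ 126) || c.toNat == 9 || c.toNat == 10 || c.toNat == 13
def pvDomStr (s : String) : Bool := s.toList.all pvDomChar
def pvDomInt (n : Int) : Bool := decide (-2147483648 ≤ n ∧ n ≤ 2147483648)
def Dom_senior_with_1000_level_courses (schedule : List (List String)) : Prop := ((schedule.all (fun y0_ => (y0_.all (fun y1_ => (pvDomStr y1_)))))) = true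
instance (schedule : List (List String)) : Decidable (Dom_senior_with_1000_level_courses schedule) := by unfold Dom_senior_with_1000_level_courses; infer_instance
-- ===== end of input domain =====

-- B replaces A's season-sequence construction, index loop and for/break scan by a direct
-- length-mod-3 computation of the senior-semester count and one any() over a slice (simpler).

-- ===== PORT A =====
def schedule_length (schedule : List (List String)) : Int := (schedule.length : Int)

def pvSuccessorDict : PySem.Dict String String :=
  PySem.Dict.ofList [("Fa", "Sp"), ("Sp", "Su"), ("Su", "Fa")]

-- the loop of semester_type_sequence; previous_season is always a key of the dict,
-- so Python's d[previous_season] never raises; getD "" is exact here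
def semester_type_sequence (schedule : List (List String)) : Option (List String) :=
  if schedule_length schedule > 0 then
    some ((schedule.foldl
      (fun (st : List String × String) _ =>
        let nxt := PySem.Dict.getD pvSuccessorDict st.2 ""
        (st.1 ++ [nxt], nxt)) ([], "Su")).1)
  else none

-- semester_types[-1]; the sequence is nonempty whenever it is not None, so IndexError is unreachable
def last_semester_type (schedule : List (List String)) : Option String :=
  match semester_type_sequence schedule with
  | some seq => PySem.List.pyGet? seq (-1)
  | none => none

-- Python falls off the end (returns None) when no branch fires
def senior_interval (schedule : List (List String)) : Option Int :=
  let lt := last_semester_type schedule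
  if lt = some "Su" then some (-3)
  else if lt = some "Sp" then some (-2)
  else if lt = some "Fa" then some (-1)
  else none

-- senior_interval is always some here (schedule nonempty), so .getD 0 is exact;
-- likewise every index of range(index, 0) is in range, so pyGet?.getD [] is exact
def senior_year_semesters_list (schedule : List (List String)) : Option (List String) :=
  if schedule = [] ∨ schedule = [[]] then none
  else
    let index := (senior_interval schedule).getD 0
    some ((PySem.List.pyRange index 0).foldl
      (fun acc i => acc ++ ((PySem.List.pyGet? schedule i).getD [])) [])

-- the for/break loop of A
def pvFindCourse : List String → Bool
  | [] => false
  | c :: rest => if PySem.Str.isIn " 1" c then true else pvFindCourse rest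

def senior_with_1000_level_courses (schedule : List (List String)) : Bool :=
  match senior_year_semesters_list schedule with
  | none => false
  | some senior_year => pvFindCourse senior_year

-- ===== PORT B =====
def senior_with_1000_level_courses_alt (schedule : List (List String)) : Bool :=
  let k : Int := PySem.Int.mod ((schedule.length : Int) - 1) 3 + 1
  (PySem.List.slice schedule (some (-k)) none).any
    (fun semester => semester.any (fun course => PySem.Str.isIn " 1" course))

-- ===== PRECONDITION & SPEC =====
def Spec_senior_with_1000_level_courses (schedule : List (List String)) (out : Bool) : Prop := out = senior_with_1000_level_courses_alt schedule
instance (schedule : List (List String)) (out : Bool) : Decidable (Spec_senior_with_1000_level_courses schedule out) := by unfold Spec_senior_with_1000_level_courses; infer_instance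

-- ===== CLAIM (what is proved, stated in full; the proofs are below) =====
def Claim_equal_senior_with_1000_level_courses : Prop := ∀ (schedule : List (List String)), Dom_senior_with_1000_level_courses schedule → Spec_senior_with_1000_level_courses schedule (senior_with_1000_level_courses schedule)

-- ===== LEMMAS AND PROOFS =====

def pvStep (s : String) : String := PySem.Dict.getD pvSuccessorDict s ""

def pvIter : String → Nat → String
  | s, 0 => s
  | s, n + 1 => pvIter (pvStep s) n

def pvF : (List String × String) → (List String) → (List String × String) :=
  fun st _ =>
    let nxt := PySem.Dict.getD pvSuccessorDict st.2 ""
    (st.1 ++ [nxt], nxt)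

lemma pvF_eq (st : List String × String) (x : List String) :
    pvF st x = (st.1 ++ [pvStep st.2], pvStep st.2) := rfl

lemma pv_snd_foldl (l : List (List String)) (acc : List String) (p : String) :
    (l.foldl pvF (acc, p)).2 = pvIter p l.length := by
  induction l generalizing acc p with
  | nil => rfl
  | cons x l ih => simpa [pvF_eq, pvIter] using ih (acc ++ [pvStep p]) (pvStep p)

lemma pv_last_foldl (l : List (List String)) (acc : List String) (p : String) (h : l ≠ []) :
    (l.foldl pvF (acc, p)).1.getLast? = some ((l.foldl pvF (acc, p)).2) := by
  induction l generalizing acc p with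
  | nil => exact absurd rfl h
  | cons x l ih =>
    cases l with
    | nil => simp [pvF_eq]
    | cons y l' => simpa [pvF_eq] using ih (acc ++ [pvStep p]) (pvStep p) (by simp)

lemma pvIter_su (n : Nat) :
    pvIter "Su" n = if n % 3 = 0 then "Su" else if n % 3 = 1 then "Fa" else "Sp" := by
  induction n using Nat.strong_induction_on with
  | _ n ih =>
    match n with
    | 0 => decide
    | 1 => decide
    | 2 => decide
    | (m + 3) =>
      have h3 : pvIter "Su" (m + 3) = pvIter "Su" m := rfl
      have hm : (m + 3) % 3 = m % 3 := by omega
      rw [h3, ih m (by omega), hm]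

lemma pv_pyGet_neg_one {α : Type} (xs : List α) (h : xs ≠ []) :
    PySem.List.pyGet? xs (-1) = xs.getLast? := by
  have hl : 0 < xs.length := List.length_pos_iff.mpr h
  simp only [PySem.List.pyGet?, PySem.List.pyIdx?]
  rw [if_neg (by omega), if_pos (by omega)]
  simp [List.getLast?_eq_getElem?]

lemma pv_senior_interval (schedule : List (List String)) (h : schedule ≠ []) :
    senior_interval schedule
      = some (-(((schedule.length - 1) % 3 + 1 : Nat) : Int)) := by
  have hl : 0 < schedule.length := List.length_pos_iff.mpr h
  have hseq : semester_type_sequence schedule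
      = some ((schedule.foldl pvF ([], "Su")).1) := by
    simp only [semester_type_sequence, schedule_length]
    rw [if_pos (by exact_mod_cast hl)]
    rfl
  have hlast : (schedule.foldl pvF ([], "Su")).1.getLast?
      = some (pvIter "Su" schedule.length) := by
    rw [pv_last_foldl _ _ _ h, pv_snd_foldl]
  have hne : (schedule.foldl pvF ([], "Su")).1 ≠ [] := by
    intro hnil
    rw [hnil] at hlast
    simp at hlast
  have hlt : last_semester_type schedule = some (pvIter "Su" schedule.length) := by
    simp only [last_semester_type, hseq]
    rw [pv_pyGet_neg_one _ hne, hlast]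
  simp only [senior_interval, hlt, pvIter_su]
  have hcases : schedule.length % 3 = 0 ∨ schedule.length % 3 = 1 ∨ schedule.length % 3 = 2 := by omega
  rcases hcases with h0 | h1 | h2
  · have : (schedule.length - 1) % 3 = 2 := by omega
    simp [h0, this]
  · have : (schedule.length - 1) % 3 = 0 := by omega
    simp [h1, this]
  · have : (schedule.length - 1) % 3 = 1 := by omega
    simp [h2, this]

lemma pv_map_pyGet_neg (xs : List (List String)) (k : Nat) (hk : k ≤ xs.length) :
    (PySem.List.pyRange (-(k : Int)) 0).map (fun i => (PySem.List.pyGet? xs i).getD [])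
      = xs.drop (xs.length - k) := by
  apply List.ext_getElem
  · simp [PySem.List.length_pyRange_one]
    omega
  · intro j h1 h2
    have hj : j < k := by
      simpa [PySem.List.length_pyRange_one] using h1
    rw [List.getElem_map, PySem.List.getElem_pyRange_one]
    rw [List.getElem_drop]
    have hidx : xs.length - k + j < xs.length := by omega
    simp only [PySem.List.pyGet?, PySem.List.pyIdx?]
    have hneg : ¬ (0 ≤ -(k : Int) + j) := by omega
    have hge : -(xs.length : Int) ≤ -(k : Int) + j := by omega
    rw [if_neg hneg, if_pos hge]
    have : xs.length - (-(-(k : Int) + j)).toNat = xs.length - k + j := by omega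
    rw [this]
    simp [List.getElem?_eq_getElem hidx]

lemma pv_slice_neg (xs : List (List String)) (k : Nat) (hk : k ≤ xs.length) (hk0 : 0 < k) :
    PySem.List.slice xs (some (-(k : Int))) none = xs.drop (xs.length - k) := by
  simp only [PySem.List.slice, PySem.List.clampIdx]
  rw [if_pos (by omega : -(k : Int) < 0), if_neg (by omega : ¬ ((xs.length : Int) + -(k : Int) < 0))]
  have h2 : ((xs.length : Int) + -(k : Int)).toNat = xs.length - k := by omega
  rw [h2]
  apply List.take_of_length_le
  simp

lemma pv_find_eq_any (l : List String) :
    pvFindCourse l = l.any (fun c => PySem.Str.isIn " 1" c) := by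
  induction l with
  | nil => rfl
  | cons c rest ih =>
    simp only [pvFindCourse, List.any_cons, ih]
    cases PySem.Str.isIn " 1" c <;> simp

-- ===== VERDICT (by name: the statement is the Claim_ definition above) =====
theorem senior_with_1000_level_courses_spec : Claim_equal_senior_with_1000_level_courses := by
  intro schedule _
  unfold Spec_senior_with_1000_level_courses
  by_cases h0 : schedule = []
  · subst h0; rfl
  by_cases h1 : schedule = [[]]
  · subst h1; rfl
  -- general case
  have hl : 0 < schedule.length := List.length_pos_iff.mpr h0
  set n := schedule.length with hn
  set k : Nat := (n - 1) % 3 + 1 with hkdef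
  have hk1 : 1 ≤ k := by omega
  have hkn : k ≤ n := by omega
  -- A's side
  have hA : senior_with_1000_level_courses schedule
      = pvFindCourse ((schedule.drop (n - k)).flatten) := by
    simp only [senior_with_1000_level_courses, senior_year_semesters_list]
    rw [if_neg (by tauto)]
    rw [pv_senior_interval schedule h0]
    simp only [Option.getD_some]
    rw [PySem.List.foldl_append_eq_flatMap (fun i => (PySem.List.pyGet? schedule i).getD [])]
    rw [List.flatMap_def, pv_map_pyGet_neg schedule k hkn]
    rfl
  -- B's side
  have hkint : PySem.Int.mod ((n : Int) - 1) 3 + 1 = (k : Int) := by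
    have : ((n : Int) - 1) = ((n - 1 : Nat) : Int) := by omega
    rw [this]
    rw [show ((3 : Int)) = ((3 : Nat) : Int) from rfl, PySem.Int.mod_natCast]
    push_cast [hkdef]
    ring
  have hB : senior_with_1000_level_courses_alt schedule
      = (schedule.drop (n - k)).any
          (fun semester => semester.any (fun course => PySem.Str.isIn " 1" course)) := by
    simp only [senior_with_1000_level_courses_alt]
    rw [← hn, hkint, pv_slice_neg schedule k hkn (by omega)]
  rw [hA, hB, pv_find_eq_any, List.any_flatten]
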